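-- pv_equiv track=rewrite | github.com/pemodest0/Quantum-systems | src/oqs_transport/network_families.py | _sierpinski_gasket_points
-- ===== SOURCE A (Python) =====
-- def _sierpinski_gasket_points(order: int) -> list[tuple[int, int]]:
--     points = {(0, 0), (1, 0), (0, 1)}
--     for _ in range(max(0, int(order))):
--         scale = 2 ** (_ + 1)
--         points = (
--             {(x, y) for x, y in points}
--             | {(x + scale, y) for x, y in points}
--             | {(x, y + scale) for x, y in points}
--         )
--     return sorted(points, key=lambda point: (point[0] + point[1], point[0], point[1]))
-- ===== SOURCE B (Python) =====
-- def _sierpinski_gasket_points(order: int) -> list[tuple[int, int]]: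
--     # Enumerate the 3**(n+1) ternary codes directly: digit for level k picks
--     # "no shift" / "shift x by 2**k" / "shift y by 2**k"; every code yields a
--     # distinct point, so no set is needed.
--     n = max(0, int(order))
--     pts = []
--     for i in range(3 ** (n + 1)):
--         x = y = 0
--         m = i
--         for k in range(n, -1, -1):
--             m, d = divmod(m, 3)
--             if d == 1:
--                 x += 2 ** k
--             elif d == 2:
--                 y += 2 ** k
--         pts.append((x, y))
--     return sorted(pts, key=lambda point: (point[0] + point[1], point[0], point[1]))
-- ===== Notes on version B (the rewrite author's own statement) =====
-- stated objective: alternative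
-- what changed: Instead of iteratively tripling a set (union of three shifted comprehensions per level) and deduplicating, B enumerates all ternary codes with one indexed loop, decodes each code digit-by-digit into its unique lattice point (per level: skip, shift x, or shift y by that level's power of two), and sorts with the identical key; no set is needed since distinct codes give distinct points.
import Mathlib
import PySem

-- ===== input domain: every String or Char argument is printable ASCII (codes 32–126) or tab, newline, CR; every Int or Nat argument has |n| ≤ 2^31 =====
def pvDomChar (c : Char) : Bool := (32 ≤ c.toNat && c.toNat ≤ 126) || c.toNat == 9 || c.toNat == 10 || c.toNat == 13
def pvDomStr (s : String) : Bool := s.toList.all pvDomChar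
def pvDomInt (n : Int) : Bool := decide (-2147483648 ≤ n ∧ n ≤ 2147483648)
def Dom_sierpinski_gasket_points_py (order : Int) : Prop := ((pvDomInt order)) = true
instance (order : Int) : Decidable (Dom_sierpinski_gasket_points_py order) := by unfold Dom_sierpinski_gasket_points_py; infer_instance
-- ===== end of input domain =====

-- B replaces A's iterative set-tripling by a direct indexed enumeration of ternary codes
-- (one decoded point per code, no set needed); objective: alternative algorithm, similar cost.

-- the sort key of both Pythons, lambda point: (point[0]+point[1], point[0], point[1]);
-- ported into the lexicographic product so that `<` on keys is Python's tuple `<`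
def pvKey (p : Int × Int) : (Int ×ₗ Int) ×ₗ Int := toLex (toLex (p.1 + p.2, p.1), p.2)

-- ===== PORT A =====
def sierpinski_gasket_points_py (order : Int) : List (Int × Int) :=
  let init : PySem.Set (Int × Int) := PySem.Set.ofList [((0:Int),(0:Int)), (1,0), (0,1)]
  let points := (PySem.List.pyRange 0 (max 0 order) 1).foldl
    (fun (pts : PySem.Set (Int × Int)) t =>
      let scale : Int := 2 ^ (t + 1).toNat   -- 2 ** (_ + 1); _ ≥ 0 here, so .toNat is exact
      PySem.Set.union
        (PySem.Set.union
          (PySem.Set.ofList (pts.map (fun p => (p.1, p.2))))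
          (PySem.Set.ofList (pts.map (fun p => (p.1 + scale, p.2)))))
        (PySem.Set.ofList (pts.map (fun p => (p.1, p.2 + scale)))))
    init
  PySem.List.sorted points pvKey

-- ===== PORT B =====
def sierpinski_gasket_points_py_alt (order : Int) : List (Int × Int) :=
  let n : Int := max 0 order
  let pts : List (Int × Int) := (PySem.List.pyRange 0 ((3:Int) ^ (n + 1).toNat) 1).foldl
    (fun pts i =>
      let st := (PySem.List.pyRange n (-1) (-1)).foldl
        (fun (st : Int × Int × Int) k =>
          let d := PySem.Int.mod st.1 3
          let m := PySem.Int.floordiv st.1 3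
          if d = 1 then (m, st.2.1 + 2 ^ k.toNat, st.2.2)   -- 2 ** k; k ≥ 0 here, so .toNat is exact
          else if d = 2 then (m, st.2.1, st.2.2 + 2 ^ k.toNat)
          else (m, st.2.1, st.2.2))
        (i, 0, 0)
      pts ++ [(st.2.1, st.2.2)])
    []
  PySem.List.sorted pts pvKey

-- ===== PRECONDITION & SPEC =====
def Spec_sierpinski_gasket_points_py (order : Int) (out : List (Int × Int)) : Prop := out = sierpinski_gasket_points_py_alt order
instance (order : Int) (out : List (Int × Int)) : Decidable (Spec_sierpinski_gasket_points_py order out) := by unfold Spec_sierpinski_gasket_points_py; infer_instance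

-- ===== CLAIM (what is proved, stated in full; the proofs are below) =====
def Claim_equal_sierpinski_gasket_points_py : Prop := ∀ (order : Int), Dom_sierpinski_gasket_points_py order → Spec_sierpinski_gasket_points_py order (sierpinski_gasket_points_py order)

-- ===== LEMMAS AND PROOFS =====

-- the gasket points with levels 0..t-1 (level k = shift x or y by 2^k, or neither),
-- in B's enumeration order
def tri : Nat → List (Int × Int)
  | 0 => [((0:Int), (0:Int))]
  | t+1 => (tri t).flatMap (fun p => [p, (p.1 + 2^t, p.2), (p.1, p.2 + 2^t)])

-- the point encoded by the ternary code m over t levels (lowest digit = top level)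
def decode : Nat → Int → Int × Int
  | 0, _ => (0, 0)
  | t+1, m =>
      let d := PySem.Int.mod m 3
      let q := PySem.Int.floordiv m 3
      let r := decode t q
      if d = 1 then (r.1 + 2^t, r.2) else if d = 2 then (r.1, r.2 + 2^t) else r

lemma tri_bound : ∀ (t : Nat) (p : Int × Int), p ∈ tri t →
    0 ≤ p.1 ∧ 0 ≤ p.2 ∧ p.1 + p.2 < 2^t := by
  intro t
  induction t with
  | zero => intro p hp; simp [tri] at hp; subst hp; norm_num
  | succ t ih =>
    intro p hp
    simp only [tri, List.mem_flatMap] at hp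
    obtain ⟨q, hq, hpq⟩ := hp
    obtain ⟨h1, h2, h3⟩ := ih q hq
    have h2t : (0:Int) < 2^t := by positivity
    have : (2:Int)^(t+1) = 2^t + 2^t := by ring
    simp only [List.mem_cons] at hpq
    rcases hpq with rfl | rfl | rfl | h
    · refine ⟨h1, h2, by omega⟩
    · refine ⟨by omega, h2, by simp; omega⟩
    · refine ⟨h1, by omega, by simp; omega⟩
    · simp at h

lemma tri_nodup : ∀ (t : Nat), (tri t).Nodup := by
  intro t
  induction t with
  | zero => simp [tri]
  | succ t ih =>
    rw [tri, List.nodup_flatMap]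
    have h2t : (0:Int) < 2^t := by positivity
    constructor
    · intro q hq
      obtain ⟨h1, h2, h3⟩ := tri_bound t q hq
      refine List.nodup_cons.2 ⟨?_, List.nodup_cons.2 ⟨?_, List.nodup_singleton _⟩⟩
      · intro h
        simp only [List.mem_cons, List.not_mem_nil, or_false] at h
        rcases h with h | h
        · have := congrArg Prod.fst h; simp at this
        · have := congrArg Prod.snd h; simp at this
      · intro h
        simp only [List.mem_cons, List.not_mem_nil, or_false] at h
        have := congrArg Prod.fst h; simp at this
    · refine ih.imp_of_mem ?_
      intro a b ha hb hne
      obtain ⟨a1, a2, a3⟩ := tri_bound t a ha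
      obtain ⟨b1, b2, b3⟩ := tri_bound t b hb
      intro e hea heb
      simp only [List.mem_cons, List.not_mem_nil, or_false] at hea heb
      apply hne
      rcases hea with rfl | rfl | rfl <;> rcases heb with h | h | h <;>
        first
          | exact h
          | (have h1' := congrArg Prod.fst h; have h2' := congrArg Prod.snd h;
             simp at h1' h2'; exact Prod.ext h1' h2')
          | (exfalso
             have h1' := congrArg Prod.fst h; have h2' := congrArg Prod.snd h
             simp at h1' h2'; omega)

lemma decode_step (t : Nat) (q d : Int) (hd0 : 0 ≤ d) (hd3 : d < 3) :
    decode (t+1) (3*q + d) =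
      (if d = 1 then ((decode t q).1 + 2^t, (decode t q).2)
       else if d = 2 then ((decode t q).1, (decode t q).2 + 2^t) else decode t q) := by
  have hm : PySem.Int.mod (3*q + d) 3 = d := by
    rw [PySem.Int.mod_eq_emod_of_pos (by norm_num)]; omega
  have hq : PySem.Int.floordiv (3*q + d) 3 = q := by
    rw [PySem.Int.floordiv_eq_ediv_of_pos (by norm_num)]; omega
  simp only [decode, hm, hq]

lemma range_triple (m : Nat) :
    List.range (3*m) = (List.range m).flatMap (fun q => [3*q, 3*q+1, 3*q+2]) := by
  induction m with
  | zero => simp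
  | succ m ih =>
    have h : 3 * (m+1) = (3*m + 1) + 1 + 1 := by ring
    rw [h, List.range_succ, List.range_succ, List.range_succ, ih, List.range_succ,
      List.flatMap_append]
    simp

-- B's decoding of all 3^t codes yields exactly tri t, in order
lemma decode_range (t : Nat) :
    (List.range (3^t)).map (fun (k : Nat) => decode t (k : Int)) = tri t := by
  induction t with
  | zero => simp [decode, tri]
  | succ t ih =>
    have h3 : 3^(t+1) = 3 * 3^t := by ring
    rw [h3, range_triple, List.map_flatMap, tri, ← ih, List.flatMap_map]
    refine List.flatMap_congr ?_
    intro q hq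
    simp only [List.map_cons, List.map_nil]
    have e0 : ((3*q : Nat) : Int) = 3*(q:Int) + 0 := by push_cast; ring
    have e1 : ((3*q+1 : Nat) : Int) = 3*(q:Int) + 1 := by push_cast; ring
    have e2 : ((3*q+2 : Nat) : Int) = 3*(q:Int) + 2 := by push_cast; ring
    rw [e0, e1, e2, decode_step t _ 0 (by norm_num) (by norm_num),
      decode_step t _ 1 (by norm_num) (by norm_num),
      decode_step t _ 2 (by norm_num) (by norm_num)]
    norm_num

-- B's inner loop is `decode`
lemma inner_loop (t : Nat) : ∀ (m x y : Int), ∃ m',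
    (PySem.List.pyRange (t : Int) (-1) (-1)).foldl
      (fun (st : Int × Int × Int) k =>
        let d := PySem.Int.mod st.1 3
        let m := PySem.Int.floordiv st.1 3
        if d = 1 then (m, st.2.1 + 2 ^ k.toNat, st.2.2)
        else if d = 2 then (m, st.2.1, st.2.2 + 2 ^ k.toNat)
        else (m, st.2.1, st.2.2))
      (m, x, y)
    = (m', x + (decode (t+1) m).1, y + (decode (t+1) m).2) := by
  induction t with
  | zero =>
    intro m x y
    rw [PySem.List.pyRange_neg_one_cons (by norm_num), PySem.List.pyRange_neg_one_eq_nil (by norm_num)]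
    refine ⟨PySem.Int.floordiv m 3, ?_⟩
    simp only [List.foldl_cons, List.foldl_nil, decode]
    split_ifs <;> simp
  | succ t ih =>
    intro m x y
    rw [PySem.List.pyRange_neg_one_cons (by push_cast; omega)]
    have hcast : ((t+1 : Nat) : Int) - 1 = (t : Int) := by push_cast; ring
    simp only [List.foldl_cons, hcast]
    have htn : (((t+1:Nat) : Int)).toNat = t+1 := by omega
    have hd : decode (t+1+1) m =
        (if PySem.Int.mod m 3 = 1 then ((decode (t+1) (PySem.Int.floordiv m 3)).1 + 2^(t+1), (decode (t+1) (PySem.Int.floordiv m 3)).2)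
         else if PySem.Int.mod m 3 = 2 then ((decode (t+1) (PySem.Int.floordiv m 3)).1, (decode (t+1) (PySem.Int.floordiv m 3)).2 + 2^(t+1))
         else decode (t+1) (PySem.Int.floordiv m 3)) := rfl
    split_ifs with h1 h2
    · obtain ⟨m', hrec⟩ := ih (PySem.Int.floordiv m 3) (x + 2^(t+1)) y
      refine ⟨m', ?_⟩
      rw [htn, hrec, hd, if_pos h1]
      simp only [Prod.mk.injEq, true_and, and_true]
      ring
    · obtain ⟨m', hrec⟩ := ih (PySem.Int.floordiv m 3) x (y + 2^(t+1))
      refine ⟨m', ?_⟩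
      rw [htn, hrec, hd, if_neg h1, if_pos h2]
      simp only [Prod.mk.injEq, true_and]
      ring
    · obtain ⟨m', hrec⟩ := ih (PySem.Int.floordiv m 3) x y
      refine ⟨m', ?_⟩
      rw [hrec, hd, if_neg h1, if_neg h2]

-- A's loop set holds exactly the elements of tri (n+1)
lemma A_fold_mem (n : Nat) (p : Int × Int) :
    p ∈ (List.range n).foldl
      (fun (pts : PySem.Set (Int × Int)) (k : Nat) =>
        PySem.Set.union
          (PySem.Set.union
            (PySem.Set.ofList (pts.map (fun p => (p.1, p.2))))
            (PySem.Set.ofList (pts.map (fun p => (p.1 + 2^(k+1), p.2)))))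
          (PySem.Set.ofList (pts.map (fun p => (p.1, p.2 + 2^(k+1))))))
      (PySem.Set.ofList [((0:Int),(0:Int)), (1,0), (0,1)])
    ↔ p ∈ tri (n+1) := by
  induction n generalizing p with
  | zero =>
    simp [PySem.Set.mem_ofList, tri]
  | succ n ih =>
    rw [List.range_succ, List.foldl_append, List.foldl_cons, List.foldl_nil]
    rw [PySem.Set.mem_union, PySem.Set.mem_union, PySem.Set.mem_ofList,
      PySem.Set.mem_ofList, PySem.Set.mem_ofList]
    have e : tri (n+1+1) = (tri (n+1)).flatMap
        (fun q => [q, (q.1 + 2^(n+1), q.2), (q.1, q.2 + 2^(n+1))]) := rfl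
    rw [e, List.mem_flatMap]
    simp only [List.mem_map, List.mem_cons, List.not_mem_nil, or_false]
    constructor
    · rintro ((⟨q,hq,rfl⟩|⟨q,hq,rfl⟩)|⟨q,hq,rfl⟩)
      · exact ⟨q, (ih q).1 hq, Or.inl rfl⟩
      · exact ⟨q, (ih q).1 hq, Or.inr (Or.inl rfl)⟩
      · exact ⟨q, (ih q).1 hq, Or.inr (Or.inr rfl)⟩
    · rintro ⟨q, hq, h | h | h⟩
      · exact Or.inl (Or.inl ⟨q, (ih q).2 hq, h.symm⟩)
      · exact Or.inl (Or.inr ⟨q, (ih q).2 hq, h.symm⟩)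
      · exact Or.inr ⟨q, (ih q).2 hq, h.symm⟩

lemma A_fold_nodup (n : Nat) :
    ((List.range n).foldl
      (fun (pts : PySem.Set (Int × Int)) (k : Nat) =>
        PySem.Set.union
          (PySem.Set.union
            (PySem.Set.ofList (pts.map (fun p => (p.1, p.2))))
            (PySem.Set.ofList (pts.map (fun p => (p.1 + 2^(k+1), p.2)))))
          (PySem.Set.ofList (pts.map (fun p => (p.1, p.2 + 2^(k+1))))))
      (PySem.Set.ofList [((0:Int),(0:Int)), (1,0), (0,1)])).Nodup := by
  induction n with
  | zero => exact PySem.Set.nodup_ofList _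
  | succ n ih =>
    rw [List.range_succ, List.foldl_append, List.foldl_cons, List.foldl_nil]
    exact PySem.Set.nodup_union _ _ (PySem.Set.nodup_union _ _ (PySem.Set.nodup_ofList _))

lemma pvKey_injective : Function.Injective pvKey := by
  intro p q h
  unfold pvKey at h
  have h1 := congrArg (fun z => (ofLex (ofLex z).1).2) h
  have h2 := congrArg (fun z => (ofLex z).2) h
  simp at h1 h2
  exact Prod.ext h1 h2

-- ===== VERDICT (by name: the statement is the Claim_ definition above) =====
theorem sierpinski_gasket_points_py_spec : Claim_equal_sierpinski_gasket_points_py := by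
  intro order _
  unfold Spec_sierpinski_gasket_points_py
  unfold sierpinski_gasket_points_py sierpinski_gasket_points_py_alt
  set N : Int := max 0 order with hN
  have hN0 : 0 ≤ N := le_max_left 0 order
  set n : Nat := N.toNat with hn
  have hNn : N = (n : Int) := (Int.toNat_of_nonneg hN0).symm
  have ht1 : ∀ k : Nat, (((k:Int)) + 1).toNat = k + 1 := by intro k; omega
  -- A's list is the Nat-indexed fold of A_fold_mem
  have hA : (PySem.List.pyRange 0 N 1).foldl
      (fun (pts : PySem.Set (Int × Int)) t =>
        let scale : Int := 2 ^ (t + 1).toNat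
        PySem.Set.union
          (PySem.Set.union
            (PySem.Set.ofList (pts.map (fun p => (p.1, p.2))))
            (PySem.Set.ofList (pts.map (fun p => (p.1 + scale, p.2)))))
          (PySem.Set.ofList (pts.map (fun p => (p.1, p.2 + scale)))))
      (PySem.Set.ofList [((0:Int),(0:Int)), (1,0), (0,1)])
      = (List.range n).foldl
      (fun (pts : PySem.Set (Int × Int)) (k : Nat) =>
        PySem.Set.union
          (PySem.Set.union
            (PySem.Set.ofList (pts.map (fun p => (p.1, p.2))))
            (PySem.Set.ofList (pts.map (fun p => (p.1 + 2^(k+1), p.2)))))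
          (PySem.Set.ofList (pts.map (fun p => (p.1, p.2 + 2^(k+1))))))
      (PySem.Set.ofList [((0:Int),(0:Int)), (1,0), (0,1)]) := by
    rw [PySem.List.pyRange_one, List.foldl_map]
    simp only [zero_add, sub_zero, ht1, ← hn]
  -- B's list is the decoded enumeration, i.e. tri (n+1)
  have hB : (PySem.List.pyRange 0 ((3:Int) ^ (N + 1).toNat) 1).foldl
      (fun pts i =>
        let st := (PySem.List.pyRange N (-1) (-1)).foldl
          (fun (st : Int × Int × Int) k =>
            let d := PySem.Int.mod st.1 3
            let m := PySem.Int.floordiv st.1 3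
            if d = 1 then (m, st.2.1 + 2 ^ k.toNat, st.2.2)
            else if d = 2 then (m, st.2.1, st.2.2 + 2 ^ k.toNat)
            else (m, st.2.1, st.2.2))
          (i, 0, 0)
        pts ++ [(st.2.1, st.2.2)])
      ([] : List (Int × Int))
      = tri (n+1) := by
    rw [PySem.List.foldl_append_singleton_eq_map
      (fun i => (((PySem.List.pyRange N (-1) (-1)).foldl
          (fun (st : Int × Int × Int) k =>
            let d := PySem.Int.mod st.1 3
            let m := PySem.Int.floordiv st.1 3
            if d = 1 then (m, st.2.1 + 2 ^ k.toNat, st.2.2)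
            else if d = 2 then (m, st.2.1, st.2.2 + 2 ^ k.toNat)
            else (m, st.2.1, st.2.2))
          (i, 0, 0)).2.1,
        ((PySem.List.pyRange N (-1) (-1)).foldl
          (fun (st : Int × Int × Int) k =>
            let d := PySem.Int.mod st.1 3
            let m := PySem.Int.floordiv st.1 3
            if d = 1 then (m, st.2.1 + 2 ^ k.toNat, st.2.2)
            else if d = 2 then (m, st.2.1, st.2.2 + 2 ^ k.toNat)
            else (m, st.2.1, st.2.2))
          (i, 0, 0)).2.2))]
    rw [PySem.List.pyRange_one, List.map_map]
    have hT : (((3:Int) ^ (N + 1).toNat) - 0).toNat = 3^(n+1) := by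
      rw [hNn]
      have h1 : (((n:Int)) + 1).toNat = n + 1 := ht1 n
      rw [h1]
      have h2 : (3:Int)^(n+1) = ((3^(n+1) : Nat) : Int) := by push_cast; ring
      rw [sub_zero, h2, Int.toNat_natCast]
    rw [hT, ← decode_range (n+1)]
    rw [List.nil_append]
    refine List.map_congr_left ?_
    intro k hk
    simp only [Function.comp, zero_add]
    obtain ⟨m', hfold⟩ := inner_loop n (k : Int) 0 0
    rw [hNn, hfold]
    simp
  show PySem.List.sorted ((PySem.List.pyRange 0 N 1).foldl
      (fun (pts : PySem.Set (Int × Int)) t =>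
        let scale : Int := 2 ^ (t + 1).toNat
        PySem.Set.union
          (PySem.Set.union
            (PySem.Set.ofList (pts.map (fun p => (p.1, p.2))))
            (PySem.Set.ofList (pts.map (fun p => (p.1 + scale, p.2)))))
          (PySem.Set.ofList (pts.map (fun p => (p.1, p.2 + scale)))))
      (PySem.Set.ofList [((0:Int),(0:Int)), (1,0), (0,1)])) pvKey
    = PySem.List.sorted ((PySem.List.pyRange 0 ((3:Int) ^ (N + 1).toNat) 1).foldl
      (fun pts i =>
        let st := (PySem.List.pyRange N (-1) (-1)).foldl
          (fun (st : Int × Int × Int) k =>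
            let d := PySem.Int.mod st.1 3
            let m := PySem.Int.floordiv st.1 3
            if d = 1 then (m, st.2.1 + 2 ^ k.toNat, st.2.2)
            else if d = 2 then (m, st.2.1, st.2.2 + 2 ^ k.toNat)
            else (m, st.2.1, st.2.2))
          (i, 0, 0)
        pts ++ [(st.2.1, st.2.2)])
      ([] : List (Int × Int))) pvKey
  rw [hA, hB]
  refine PySem.List.sorted_eq_sorted_of_perm _ _ pvKey pvKey_injective ?_
  rw [List.perm_ext_iff_of_nodup (A_fold_nodup n) (tri_nodup (n+1))]
  exact fun p => A_fold_mem n p
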